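-- pv_equiv track=rewrite | github.com/Ottovon-Bis89/Functional_software_for-Genome_Evolution | Supplementary_Code/Evolver.py | apply_duplication
-- ===== SOURCE A (Python) =====
-- def apply_duplication(genome, position):
--     """Duplicate an element at a specific position in the genome."""
--     # Find the target chromosome and position
--     total_length = 0
--     for chrom_idx, chromosome in enumerate(genome):
--         if total_length + len(chromosome) > position:
--             pos_in_chrom = position - total_length
--             element = chromosome[pos_in_chrom]
--             chromosome.insert(pos_in_chrom + 1, element)
--             break
--         total_length += len(chromosome)
--     return genome
-- ===== SOURCE B (Python) =====
-- def apply_duplication(genome, position):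
--     """Duplicate an element at a specific position in the genome.
--
--     Same in-place mutation of the target chromosome as A; locates the
--     target chromosome via a cumulative end-offset table + binary search."""
--     ends = []
--     total = 0
--     for chromosome in genome:
--         total += len(chromosome)
--         ends.append(total)
--     lo, hi = 0, len(ends)
--     while lo < hi:
--         mid = (lo + hi) // 2
--         if ends[mid] <= position:
--             lo = mid + 1
--         else:
--             hi = mid
--     if lo < len(genome):
--         chromosome = genome[lo]
--         pos_in_chrom = position - (ends[lo] - len(chromosome))
--         element = chromosome[pos_in_chrom]
--         chromosome.insert(pos_in_chrom + 1, element)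
--     return genome
-- ===== Notes on version B (the rewrite author's own statement) =====
-- stated objective: alternative
-- what changed: B precomputes a cumulative end-offset table and locates the target chromosome with a hand-written binary search over it, instead of A's single accumulating linear scan with an in-loop break.
import Mathlib
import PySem

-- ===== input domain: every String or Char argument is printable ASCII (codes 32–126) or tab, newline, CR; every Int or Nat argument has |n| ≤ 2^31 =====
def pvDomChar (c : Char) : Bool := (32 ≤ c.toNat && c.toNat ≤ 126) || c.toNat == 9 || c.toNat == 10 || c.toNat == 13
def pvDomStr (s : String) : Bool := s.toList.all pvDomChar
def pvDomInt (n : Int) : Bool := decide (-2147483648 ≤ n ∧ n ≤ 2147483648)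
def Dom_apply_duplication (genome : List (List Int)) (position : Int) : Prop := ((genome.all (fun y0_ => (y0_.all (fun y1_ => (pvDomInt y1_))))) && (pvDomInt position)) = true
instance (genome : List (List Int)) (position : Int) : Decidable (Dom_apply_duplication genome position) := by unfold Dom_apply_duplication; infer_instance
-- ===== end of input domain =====

-- B replaces A's accumulating linear scan by a cumulative end-offset table plus binary search
-- (alternative decomposition, not claimed faster); both Pythons mutate the target chromosome
-- in place identically, the equivalence proved here is about the returned value.

-- ===== PORT A =====
-- the for-loop with accumulator total_length and break; the none branch of pyGet? is A's
-- IndexError (excluded by Pre_), where the port leaves the list unchanged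
def pvLoopA (position total : Int) : List (List Int) → List (List Int)
  | [] => []
  | c :: rest =>
    if total + (c.length : Int) > position then
      (match PySem.List.pyGet? c (position - total) with
       | some e => PySem.List.insert c (position - total + 1) e
       | none => c) :: rest
    else c :: pvLoopA position (total + (c.length : Int)) rest

def apply_duplication (genome : List (List Int)) (position : Int) : List (List Int) :=
  pvLoopA position 0 genome

-- ===== PORT B =====
-- ends = cumulative end offsets
def pvEnds : List (List Int) → Int → List Int
  | [], _ => []
  | c :: rest, total => (total + (c.length : Int)) :: pvEnds rest (total + (c.length : Int))

-- Source B's hand-written binary search (bisect_right); the while loop runs with fuel hi - lo,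
-- which strictly bounds its iteration count, so the port is structurally recursive
def pvBsrGo (ends : List Int) (position : Int) : Nat → Nat → Nat → Nat
  | 0, lo, _ => lo
  | fuel + 1, lo, hi =>
    if lo < hi then
      if ends.getD ((lo + hi) / 2) 0 ≤ position then pvBsrGo ends position fuel ((lo + hi) / 2 + 1) hi
      else pvBsrGo ends position fuel lo ((lo + hi) / 2)
    else lo

def pvBsr (ends : List Int) (position : Int) (lo hi : Nat) : Nat :=
  pvBsrGo ends position (hi - lo) lo hi

def apply_duplication_alt (genome : List (List Int)) (position : Int) : List (List Int) :=
  let ends := pvEnds genome 0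
  let i := pvBsr ends position 0 ends.length
  if i < genome.length then
    let c := genome.getD i []
    let p := position - (ends.getD i 0 - (c.length : Int))
    match PySem.List.pyGet? c p with
    | some e => genome.set i (PySem.List.insert c (p + 1) e)
    | none => genome
  else genome

-- ===== PRECONDITION & SPEC =====
-- Pre_ excludes exactly the inputs where Python A raises IndexError: a negative position below
-- -len(genome[0]) with nonempty genome (A selects chromosome 0 there and indexes out of range).
-- B raises the same IndexError on those inputs.
def Pre_apply_duplication (genome : List (List Int)) (position : Int) : Prop :=
  0 ≤ position ∨ genome = [] ∨ -(((genome.headD []).length : Int)) ≤ position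
instance (genome : List (List Int)) (position : Int) : Decidable (Pre_apply_duplication genome position) := by unfold Pre_apply_duplication; infer_instance

def pvWitness_apply_duplication : List (List Int) × Int := ([[1, 2], [3]], 1)

def Spec_apply_duplication (genome : List (List Int)) (position : Int) (out : List (List Int)) : Prop := out = apply_duplication_alt genome position
instance (genome : List (List Int)) (position : Int) (out : List (List Int)) : Decidable (Spec_apply_duplication genome position out) := by unfold Spec_apply_duplication; infer_instance

-- ===== CLAIM (what is proved, stated in full; the proofs are below) =====
def Claim_equal_apply_duplication : Prop := ∀ (genome : List (List Int)) (position : Int), Dom_apply_duplication genome position → Pre_apply_duplication genome position → Spec_apply_duplication genome position (apply_duplication genome position)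

-- ===== LEMMAS AND PROOFS =====

-- elements of the takeWhile prefix are ≤ p
lemma pvTwLe (p : Int) : ∀ (l : List Int) (j : Nat),
    j < (l.takeWhile (fun x => x ≤ p)).length → l.getD j 0 ≤ p := by
  intro l
  induction l with
  | nil => intro j h; simp at h
  | cons a t ih =>
    intro j h
    by_cases ha : a ≤ p
    · cases j with
      | zero => simpa using ha
      | succ n =>
        simp [List.takeWhile, ha] at h
        simpa using ih n (by omega)
    · simp [List.takeWhile, ha] at h

-- the first element after the takeWhile prefix is > p
lemma pvTwStop (p : Int) : ∀ (l : List Int),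
    (l.takeWhile (fun x => x ≤ p)).length < l.length →
    p < l.getD ((l.takeWhile (fun x => x ≤ p)).length) 0 := by
  intro l
  induction l with
  | nil => intro h; simp at h
  | cons a t ih =>
    intro h
    by_cases ha : a ≤ p
    · simp [List.takeWhile, ha] at h ⊢
      exact ih (by omega)
    · simp [List.takeWhile, ha] at h ⊢
      omega

-- getD is monotone on a Pairwise (· ≤ ·) list
lemma pvSortedGetD (l : List Int) (hl : l.Pairwise (· ≤ ·)) (j k : Nat)
    (hjk : j ≤ k) (hk : k < l.length) : l.getD j 0 ≤ l.getD k 0 := by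
  rcases Nat.lt_or_ge j k with h | h
  · have := (List.pairwise_iff_getElem.mp hl) j k (by omega) hk h
    rw [List.getD_eq_getElem l 0 (by omega), List.getD_eq_getElem l 0 hk]
    exact this
  · have : j = k := by omega
    subst this; rfl

lemma pvEndsGe : ∀ (g : List (List Int)) (t : Int) (x : Int), x ∈ pvEnds g t → t ≤ x := by
  intro g
  induction g with
  | nil => intro t x h; simp [pvEnds] at h
  | cons c rest ih =>
    intro t x h
    simp [pvEnds] at h
    rcases h with h | h
    · omega
    · have := ih (t + (c.length : Int)) x h
      omega

lemma pvEndsPairwise : ∀ (g : List (List Int)) (t : Int), (pvEnds g t).Pairwise (· ≤ ·) := by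
  intro g
  induction g with
  | nil => intro t; simp [pvEnds]
  | cons c rest ih =>
    intro t
    refine List.Pairwise.cons ?_ (ih _)
    intro x hx
    exact pvEndsGe rest _ x hx

-- the binary search computes the takeWhile length on a sorted list
lemma pvBsrGoEq (l : List Int) (p : Int) (hl : l.Pairwise (· ≤ ·)) :
    ∀ (fuel lo hi : Nat), hi - lo ≤ fuel → lo ≤ (l.takeWhile (fun x => x ≤ p)).length →
    (l.takeWhile (fun x => x ≤ p)).length ≤ hi → hi ≤ l.length →
    pvBsrGo l p fuel lo hi = (l.takeWhile (fun x => x ≤ p)).length := by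
  intro fuel
  induction fuel with
  | zero => intro lo hi hf h1 h2 h3; simp only [pvBsrGo]; omega
  | succ fuel ih =>
    intro lo hi hf h1 h2 h3
    simp only [pvBsrGo]
    by_cases hlt : lo < hi
    · rw [if_pos hlt]
      by_cases hle : l.getD ((lo + hi) / 2) 0 ≤ p
      · rw [if_pos hle]
        apply ih _ hi (by omega) _ h2 h3
        -- (lo+hi)/2 + 1 ≤ k: since l.getD mid ≤ p and l is sorted, mid < k
        by_contra hc
        have hklt : (l.takeWhile (fun x => x ≤ p)).length ≤ (lo + hi) / 2 := by omega
        have hkl : (l.takeWhile (fun x => x ≤ p)).length < l.length := by omega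
        have := pvTwStop p l hkl
        have := pvSortedGetD l hl _ ((lo + hi) / 2) hklt (by omega)
        omega
      · rw [if_neg hle]
        apply ih lo _ (by omega) h1 _ (by omega)
        -- k ≤ (lo+hi)/2: since ¬ l.getD mid ≤ p, mid cannot be inside the prefix
        by_contra hc
        have hmid : (lo + hi) / 2 < (l.takeWhile (fun x => x ≤ p)).length := by omega
        have := pvTwLe p l ((lo + hi) / 2) hmid
        omega
    · rw [if_neg hlt]; omega

lemma pvBsrEq (l : List Int) (p : Int) (hl : l.Pairwise (· ≤ ·)) (lo hi : Nat)
    (h1 : lo ≤ (l.takeWhile (fun x => x ≤ p)).length)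
    (h2 : (l.takeWhile (fun x => x ≤ p)).length ≤ hi) (h3 : hi ≤ l.length) :
    pvBsr l p lo hi = (l.takeWhile (fun x => x ≤ p)).length :=
  pvBsrGoEq l p hl (hi - lo) lo hi (le_refl _) h1 h2 h3

-- the common index form both ports reduce to
def pvKForm (g : List (List Int)) (total p : Int) : List (List Int) :=
  let ends := pvEnds g total
  let i := (ends.takeWhile (fun x => x ≤ p)).length
  if i < g.length then
    let c := g.getD i []
    let q := p - (ends.getD i 0 - (c.length : Int))
    match PySem.List.pyGet? c q with
    | some e => g.set i (PySem.List.insert c (q + 1) e)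
    | none => g
  else g

lemma pvLoopAEq : ∀ (g : List (List Int)) (total p : Int),
    pvLoopA p total g = pvKForm g total p := by
  intro g
  induction g with
  | nil => intro total p; simp [pvLoopA, pvKForm, pvEnds]
  | cons c rest ih =>
    intro total p
    by_cases hc : total + (c.length : Int) > p
    · have hpred : ¬ (total + (c.length : Int) ≤ p) := by omega
      have htw : List.takeWhile (fun x => decide (x ≤ p))
          ((total + (c.length : Int)) :: pvEnds rest (total + (c.length : Int))) = [] :=
        List.takeWhile_cons_of_neg (by simpa using hpred)
      simp only [pvKForm, pvEnds, htw, List.length_nil, List.length_cons, pvLoopA]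
      rw [if_pos hc, if_pos (Nat.succ_pos rest.length)]
      simp only [List.getD_cons_zero]
      have harith : p - (total + (c.length : Int) - (c.length : Int)) = p - total := by ring
      rw [harith]
      cases PySem.List.pyGet? c (p - total) with
      | none => rfl
      | some e => rfl
    · have hpred : total + (c.length : Int) ≤ p := by omega
      have htw : List.takeWhile (fun x => decide (x ≤ p))
          ((total + (c.length : Int)) :: pvEnds rest (total + (c.length : Int))) =
          (total + (c.length : Int)) ::
            List.takeWhile (fun x => decide (x ≤ p)) (pvEnds rest (total + (c.length : Int))) :=
        List.takeWhile_cons_of_pos (by simpa using hpred)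
      simp only [pvLoopA]
      rw [if_neg hc, ih (total + (c.length : Int)) p]
      simp only [pvKForm, pvEnds, htw, List.length_cons]
      set k := ((pvEnds rest (total + (c.length : Int))).takeWhile (fun x => decide (x ≤ p))).length with hk
      by_cases hik : k < rest.length
      · rw [if_pos (by omega : k + 1 < rest.length + 1), if_pos hik]
        simp only [List.getD_cons_succ, List.set_cons_succ]
        cases PySem.List.pyGet? (rest.getD k [])
            (p - ((pvEnds rest (total + (c.length : Int))).getD k 0 - ((rest.getD k []).length : Int))) with
        | none => rfl
        | some e => rfl
      · rw [if_neg (by omega : ¬ k + 1 < rest.length + 1), if_neg hik]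

-- ===== VERDICT (by name: the statement is the Claim_ definition above) =====
theorem apply_duplication_spec : Claim_equal_apply_duplication := by
  intro genome position _ _
  unfold Spec_apply_duplication apply_duplication
  rw [pvLoopAEq genome 0 position]
  simp only [apply_duplication_alt]
  rw [pvBsrEq (pvEnds genome 0) position (pvEndsPairwise genome 0) 0 (pvEnds genome 0).length
      (Nat.zero_le _) (List.takeWhile_sublist _).length_le (le_refl _)]
  rfl
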